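-- pv_equiv track=rewrite | github.com/vivaansinghvi07/kenken-solver | main.py | process
-- ===== SOURCE A (Python) =====
-- def process(text: str, SYMBOLS: str, REPLACEMENT_PAIRS: list[tuple[str, str]]) -> str | None:
--     text = text.replace(' ', '')    # remove spaces everywhere
--     text = text.lower()             # standardize style
--     text = text.strip()             # remove any whitespace (like \n, \t)
--
--     if [char for char in text if char not in SYMBOLS] == []:
--         return None
--
--     # undo 180-degree interpreted rotation by the OCR
--     if text[0] in SYMBOLS:
--         text = [*reversed(text)]
--         for replacement in REPLACEMENT_PAIRS:
--             for i, char in enumerate(text):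
--                 if char in replacement:
--                     text[i] = r1 if char != (r1:=(replacement[1])) else replacement[0]
--         return "".join(text)
--
--     return text
-- ===== SOURCE B (Python) =====
-- def process(text: str, SYMBOLS: str, REPLACEMENT_PAIRS: list[tuple[str, str]]) -> str | None:
--     text = text.replace(' ', '').lower().strip()
--
--     if set(text) <= set(SYMBOLS):
--         return None
--
--     if text[0] not in SYMBOLS:
--         return text
--
--     # compose all swaps into one translation table, then translate in one pass
--     table = {}
--     for a, b in REPLACEMENT_PAIRS:
--         table.setdefault(a, a)
--         table.setdefault(b, b)
--         table = {k: (b if v == a else a if v == b else v) for k, v in table.items()}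
--     return "".join(table.get(c, c) for c in reversed(text))
-- ===== Notes on version B (the rewrite author's own statement) =====
-- stated objective: alternative
-- what changed: A repeatedly rescans and mutates the whole reversed character list once per replacement pair; B instead folds the pairs into a single dict translation table (composing the transpositions by value-rewriting the table), checks validity with a set-subset test, and translates the reversed text in one lookup pass.
import Mathlib
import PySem

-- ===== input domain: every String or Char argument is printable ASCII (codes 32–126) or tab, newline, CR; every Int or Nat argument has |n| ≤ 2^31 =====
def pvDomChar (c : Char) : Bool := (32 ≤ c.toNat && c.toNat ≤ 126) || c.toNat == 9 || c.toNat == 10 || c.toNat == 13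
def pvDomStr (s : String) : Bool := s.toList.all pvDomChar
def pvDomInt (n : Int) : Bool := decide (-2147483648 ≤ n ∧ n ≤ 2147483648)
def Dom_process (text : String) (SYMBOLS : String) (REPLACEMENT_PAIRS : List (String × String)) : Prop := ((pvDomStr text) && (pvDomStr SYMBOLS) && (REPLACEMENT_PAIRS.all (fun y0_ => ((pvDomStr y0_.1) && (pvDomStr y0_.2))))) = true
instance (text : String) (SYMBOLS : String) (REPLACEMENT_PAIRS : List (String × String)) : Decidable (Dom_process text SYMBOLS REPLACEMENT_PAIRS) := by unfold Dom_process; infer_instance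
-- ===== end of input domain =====

-- B replaces A's per-pair rescans of the whole reversed list by one dict translation table
-- (the pair swaps composed by value-rewriting) looked up in a single pass (objective: alternative).

-- ===== PORT A =====
-- one in-place update of a list cell for one replacement pair: Python's
-- `text[i] = r1 if char != (r1:=replacement[1]) else replacement[0]` guarded by `char in replacement`
def pvStepA (p : String × String) (s : String) : String :=
  if s = p.1 ∨ s = p.2 then (if s ≠ p.2 then p.2 else p.1) else s

def process (text : String) (SYMBOLS : String) (REPLACEMENT_PAIRS : List (String × String)) : Option String :=
  let t := PySem.Str.replace text " " ""
  let t := PySem.Str.lower t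
  let t := PySem.Str.strip t
  if t.toList.filter (fun c => !(SYMBOLS.toList.contains c)) = [] then none
  else if SYMBOLS.toList.contains (t.toList.headD ' ') then
    -- `text[0]`: t is nonempty on this branch (the filter above is nonempty), headD's default is never used
    let l0 : List String := t.toList.reverse.map (fun c => String.ofList [c])
    let l := REPLACEMENT_PAIRS.foldl (fun lst p => lst.map (pvStepA p)) l0
    some (PySem.Str.join "" l)
  else some t

-- ===== PORT B =====
-- one pass of Source B's table loop: two setdefaults, then the dict comprehension rewriting the
-- values (keys unchanged and distinct, so the comprehension is exactly a map over items)
def pvTableStep (tbl : PySem.Dict String String) (p : String × String) : PySem.Dict String String :=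
  PySem.Dict.mk (((tbl.setdefault p.1 p.1).setdefault p.2 p.2).items.map (fun kv =>
    (kv.1, if kv.2 = p.1 then p.2 else if kv.2 = p.2 then p.1 else kv.2)))

def process_alt (text : String) (SYMBOLS : String) (REPLACEMENT_PAIRS : List (String × String)) : Option String :=
  let t := PySem.Str.strip (PySem.Str.lower (PySem.Str.replace text " " ""))
  -- set(text) <= set(SYMBOLS): every distinct character of t occurs in SYMBOLS
  if (PySem.Set.ofList t.toList).all (fun c => SYMBOLS.toList.contains c) then none
  else if !(SYMBOLS.toList.contains (t.toList.headD ' ')) then some t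
  else
    let tbl := REPLACEMENT_PAIRS.foldl pvTableStep PySem.Dict.empty
    some (PySem.Str.join "" (t.toList.reverse.map (fun c =>
      tbl.getD (String.ofList [c]) (String.ofList [c]))))

-- ===== PRECONDITION & SPEC =====
def Spec_process (text : String) (SYMBOLS : String) (REPLACEMENT_PAIRS : List (String × String)) (out : Option String) : Prop := out = process_alt text SYMBOLS REPLACEMENT_PAIRS
instance (text : String) (SYMBOLS : String) (REPLACEMENT_PAIRS : List (String × String)) (out : Option String) : Decidable (Spec_process text SYMBOLS REPLACEMENT_PAIRS out) := by unfold Spec_process; infer_instance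

-- ===== CLAIM (what is proved, stated in full; the proofs are below) =====
def Claim_equal_process : Prop := ∀ (text : String) (SYMBOLS : String) (REPLACEMENT_PAIRS : List (String × String)), Dom_process text SYMBOLS REPLACEMENT_PAIRS → Spec_process text SYMBOLS REPLACEMENT_PAIRS (process text SYMBOLS REPLACEMENT_PAIRS)

-- ===== LEMMAS AND PROOFS =====

-- the value rewrite Source B's comprehension applies for one pair
def pvStepB (p : String × String) (v : String) : String :=
  if v = p.1 then p.2 else if v = p.2 then p.1 else v

-- A's per-pair cell update equals B's per-pair value rewrite, pointwise
theorem pvStep_eq (p : String × String) (s : String) : pvStepA p s = pvStepB p s := by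
  unfold pvStepA pvStepB
  by_cases h1 : s = p.1
  · by_cases h2 : s = p.2 <;> simp [h1]
  · by_cases h2 : s = p.2
    · simp only [h2, or_true, if_true, ite_not]
      by_cases hab : p.2 = p.1 <;> simp [hab]
    · simp [h1, h2]

-- loop interchange on A's side: folding the pairs with a full map pass each
-- = one map with the per-value fold of the pair steps
theorem pvFold_map (RP : List (String × String)) (l0 : List String) :
    RP.foldl (fun lst p => lst.map (pvStepA p)) l0
      = l0.map (fun s => RP.foldl (fun v p => pvStepB p v) s) := by
  induction RP generalizing l0 with
  | nil => simp only [List.foldl_nil]; exact (List.map_id l0).symm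
  | cons p ps ih =>
      simp only [List.foldl_cons, ih, List.map_map]
      exact List.map_congr_left fun s _ => by simp [Function.comp, pvStep_eq]

-- get? through setdefault at a different key
theorem pvGet?_setdefault_of_ne (tbl : PySem.Dict String String) (c v s : String) (h : s ≠ c) :
    (tbl.setdefault c v).get? s = tbl.get? s := by
  by_cases hc : tbl.contains c = true
  · rw [PySem.Dict.setdefault_of_contains _ _ hc]
  · rw [PySem.Dict.setdefault_of_not_contains _ _ (by simpa using hc),
        PySem.Dict.get?_insert_of_ne _ _ h]

-- getD through the key-preserving value rewrite Source B's comprehension performs on the items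
theorem pvGetD_mk_map (l : List (String × String)) (p : String × String) (s d : String) :
    (PySem.Dict.mk (l.map (fun kv =>
        (kv.1, if kv.2 = p.1 then p.2 else if kv.2 = p.2 then p.1 else kv.2)))).getD s d
      = (((PySem.Dict.mk l).get? s).map (pvStepB p)).getD d := by
  induction l with
  | nil => simp [PySem.Dict.getD_eq_get?_getD, PySem.Dict.get?]
  | cons kv rest ih =>
      obtain ⟨k, v⟩ := kv
      simp only [List.map_cons, PySem.Dict.getD_eq_get?_getD, PySem.Dict.get?_mk_cons] at *
      by_cases h : k = s <;> simp [h, ih, pvStepB]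

-- the two setdefaults: get? afterwards is the old value, defaulted to s itself on the pair's keys
theorem pvGet?_setdefault2 (tbl : PySem.Dict String String) (a b s : String) :
    ((tbl.setdefault a a).setdefault b b).get? s
      = if s = a ∨ s = b then some ((tbl.get? s).getD s) else tbl.get? s := by
  by_cases hb : s = b
  · subst hb
    rw [PySem.Dict.get?_setdefault_self]
    by_cases ha : s = a
    · subst ha
      rw [PySem.Dict.get?_setdefault_self]
      cases tbl.get? s <;> simp
    · rw [pvGet?_setdefault_of_ne _ _ _ _ ha]
      simp
  · rw [pvGet?_setdefault_of_ne _ _ _ _ hb]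
    by_cases ha : s = a
    · subst ha
      rw [PySem.Dict.get?_setdefault_self]
      simp
    · rw [pvGet?_setdefault_of_ne _ _ _ _ ha]
      simp [ha, hb]

-- one table-building step composes one pair swap onto every looked-up value
theorem pvTableStep_getD (tbl : PySem.Dict String String) (p : String × String) (s : String) :
    (pvTableStep tbl p).getD s s = pvStepB p (tbl.getD s s) := by
  have hmk : ∀ d : PySem.Dict String String, PySem.Dict.mk d.items = d := fun _ => rfl
  unfold pvTableStep
  rw [pvGetD_mk_map ((tbl.setdefault p.1 p.1).setdefault p.2 p.2).items p s s, hmk,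
      pvGet?_setdefault2, PySem.Dict.getD_eq_get?_getD]
  split_ifs with h
  · cases tbl.get? s <;> simp
  · rcases not_or.mp h with ⟨ha, hb⟩
    cases tbl.get? s <;> simp [pvStepB, ha, hb]

-- the whole table built from any start: looking up s yields the pair steps folded over tbl's value
theorem pvTable_getD (RP : List (String × String)) (tbl : PySem.Dict String String) (s : String) :
    (RP.foldl pvTableStep tbl).getD s s
      = RP.foldl (fun v p => pvStepB p v) (tbl.getD s s) := by
  induction RP generalizing tbl with
  | nil => rfl
  | cons p ps ih => simp only [List.foldl_cons, ih, pvTableStep_getD]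

-- the two None-tests agree: "no char of t outside SYMBOLS" ↔ "every distinct char of t in SYMBOLS"
theorem pvNone_test (t : List Char) (S : List Char) :
    (t.filter (fun c => !(S.contains c)) = [])
      ↔ ((PySem.Set.ofList t).all (fun c => S.contains c) = true) := by
  simp [List.filter_eq_nil_iff, List.all_eq_true, PySem.Set.mem_ofList]

-- ===== VERDICT (by name: the statement is the Claim_ definition above) =====
theorem process_spec : Claim_equal_process := by
  intro text SYMBOLS RP _
  show process text SYMBOLS RP = process_alt text SYMBOLS RP
  simp only [process, process_alt]
  generalize (PySem.Str.strip (PySem.Str.lower (PySem.Str.replace text " " ""))) = t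
  by_cases hnone : t.toList.filter (fun c => !(SYMBOLS.toList.contains c)) = []
  · rw [if_pos hnone, if_pos ((pvNone_test _ _).mp hnone)]
  · rw [if_neg hnone, if_neg (fun h => hnone ((pvNone_test _ _).mpr h))]
    cases hhd : SYMBOLS.toList.contains (t.toList.headD ' ') with
    | false => simp only [Bool.not_false, if_true, Bool.false_eq_true, if_false]
    | true =>
        simp only [Bool.not_true, if_true, Bool.false_eq_true, if_false]
        rw [pvFold_map]
        simp only [List.map_map]
        congr 2
        refine List.map_congr_left fun c _ => ?_
        simp only [Function.comp, pvTable_getD, PySem.Dict.getD_empty]
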